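-- pv_equiv track=rewrite | github.com/miliar/Code_Jam_Webscraper | solutions_python/Problem_190/138.py | cal_n
-- ===== SOURCE A (Python) =====
-- def match(o):
-- 	if o == "P":
-- 		return ["P", "R"]
-- 	elif o == "R":
-- 		return ["R", "S"]
-- 	elif o == "S":
-- 		return ["P", "S"]
--
-- def cal_n(N):
-- 	l = ["P"]
-- 	for i in range(N):
-- 		nl = []
-- 		for item in l:
-- 			nl += match(item)
-- 		l = nl
-- 	c_p = 0
-- 	c_r = 0
-- 	c_s = 0
-- 	for i in l:
-- 		if i == "P":
-- 			c_p += 1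
-- 		if i == "R":
-- 			c_r += 1
-- 		if i == "S":
-- 			c_s += 1
-- 	return [c_r, c_p, c_s], l
-- ===== SOURCE B (Python) =====
-- def cal_n(N):
--     def match2(c):
--         return {"P": ("P", "R"), "R": ("R", "S"), "S": ("P", "S")}[c]
--
--     def expand(c, n):
--         if n <= 0:
--             return [c]
--         a, b = match2(c)
--         return expand(a, n - 1) + expand(b, n - 1)
--
--     l = expand("P", N)
--     return [l.count("R"), l.count("P"), l.count("S")], l
-- ===== Notes on version B (the rewrite author's own statement) =====
-- stated objective: alternative
-- what changed: Replaces the level-by-level doubling loop (rebuild the whole list N times) with a depth-first recursive expand(c,n) that emits the final leaf sequence directly, and replaces the three-counter tallying loop with list.count calls.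
import Mathlib
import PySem

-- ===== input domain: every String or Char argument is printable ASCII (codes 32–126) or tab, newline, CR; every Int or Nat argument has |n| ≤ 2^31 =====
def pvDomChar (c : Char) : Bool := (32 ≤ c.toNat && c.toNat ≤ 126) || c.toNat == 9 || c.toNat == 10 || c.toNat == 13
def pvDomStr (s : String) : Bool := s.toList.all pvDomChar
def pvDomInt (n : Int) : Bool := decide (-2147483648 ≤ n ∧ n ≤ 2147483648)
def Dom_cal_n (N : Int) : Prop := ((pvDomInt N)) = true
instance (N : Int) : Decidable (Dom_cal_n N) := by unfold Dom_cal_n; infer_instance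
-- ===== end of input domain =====

-- B replaces A's level-by-level doubling with a depth-first recursive expansion and counts via list.count (alternative decomposition, same result).

-- ===== PORT A =====
-- match(o): unreachable branch (o not in P/R/S) returns [] here; Python returns None, which
-- cal_n never triggers since every produced letter is P/R/S.
def matchA (o : String) : List String :=
  if o = "P" then ["P", "R"]
  else if o = "R" then ["R", "S"]
  else if o = "S" then ["P", "S"]
  else []

def cal_n (N : Int) : List Int × List String :=
  let l := (PySem.List.pyRange 0 N 1).foldl
    (fun l _ => l.foldl (fun nl item => nl ++ matchA item) []) ["P"]
  let c := l.foldl (fun (c : Int × Int × Int) i =>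
      let cp := if i = "P" then c.1 + 1 else c.1
      let cr := if i = "R" then c.2.1 + 1 else c.2.1
      let cs := if i = "S" then c.2.2 + 1 else c.2.2
      (cp, cr, cs)) (0, 0, 0)
  ([c.2.1, c.1, c.2.2], l)

-- ===== PORT B =====
def matchB (c : String) : String × String :=
  if c = "P" then ("P", "R")
  else if c = "R" then ("R", "S")
  else ("P", "S")

-- expand(c, n): recursion on n via its Nat value (n <= 0 is the base case in Source B)
def expandB (c : String) : Nat → List String
  | 0 => [c]
  | n + 1 => expandB (matchB c).1 n ++ expandB (matchB c).2 n

def cal_n_alt (N : Int) : List Int × List String :=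
  let l := expandB "P" N.toNat
  ([(l.count "R" : Int), (l.count "P" : Int), (l.count "S" : Int)], l)

-- ===== PRECONDITION & SPEC =====
def Spec_cal_n (N : Int) (out : List Int × List String) : Prop := out = cal_n_alt N
instance (N : Int) (out : List Int × List String) : Decidable (Spec_cal_n N out) := by unfold Spec_cal_n; infer_instance

-- ===== CLAIM (what is proved, stated in full; the proofs are below) =====
def Claim_equal_cal_n : Prop := ∀ (N : Int), Dom_cal_n N → Spec_cal_n N (cal_n N)

-- ===== LEMMAS AND PROOFS =====

def goodStr (c : String) : Prop := c = "P" ∨ c = "R" ∨ c = "S"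

lemma matchA_good {c : String} (h : goodStr c) :
    matchA c = [(matchB c).1, (matchB c).2] := by
  rcases h with h | h | h <;> subst h <;> decide

lemma matchA_good_mem {c : String} (h : goodStr c) :
    ∀ d ∈ matchA c, goodStr d := by
  intro d hd
  rcases h with h | h | h <;> subst h <;>
    simp [matchA] at hd <;> rcases hd with h | h <;> subst h <;>
    simp [goodStr]

-- A's inner loop is flatMap
lemma stepA_eq_flatMap (l : List String) :
    l.foldl (fun nl item => nl ++ matchA item) [] = l.flatMap matchA := by
  have h : ∀ (acc : List String),
      l.foldl (fun nl item => nl ++ matchA item) acc = acc ++ l.flatMap matchA := by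
    induction l with
    | nil => simp
    | cons x xs ih => intro acc; simp [List.foldl, ih, List.append_assoc]
  simpa using h []

-- A's outer loop only counts the range elements
lemma foldl_ignore {α β : Type} (f : α → α) (xs : List β) (a : α) :
    xs.foldl (fun a _ => f a) a = f^[xs.length] a := by
  induction xs generalizing a with
  | nil => simp
  | cons x xs ih => simp [List.foldl, ih, Function.iterate_succ_apply]

lemma expand_level (n : Nat) (l : List String) (h : ∀ c ∈ l, goodStr c) :
    (fun l => l.flatMap matchA)^[n] l = l.flatMap (fun c => expandB c n) := by
  induction n generalizing l with
  | zero => simp [expandB]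
  | succ n ih =>
    rw [Function.iterate_succ_apply]
    rw [ih (l.flatMap matchA)
      (by intro d hd
          rcases List.mem_flatMap.mp hd with ⟨c, hc, hdc⟩
          exact matchA_good_mem (h c hc) d hdc)]
    rw [List.flatMap_assoc]
    apply List.flatMap_congr
    intro c hc
    rw [matchA_good (h c hc)]
    simp [expandB]

lemma count_loop (l : List String) (cp cr cs : Int) :
    l.foldl (fun (c : Int × Int × Int) i =>
      let cp := if i = "P" then c.1 + 1 else c.1
      let cr := if i = "R" then c.2.1 + 1 else c.2.1
      let cs := if i = "S" then c.2.2 + 1 else c.2.2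
      (cp, cr, cs)) (cp, cr, cs)
    = (cp + (l.count "P" : Int), cr + (l.count "R" : Int), cs + (l.count "S" : Int)) := by
  induction l generalizing cp cr cs with
  | nil => simp
  | cons x xs ih =>
    simp only [List.foldl, ih, List.count_cons]
    by_cases hp : x = "P" <;> by_cases hr : x = "R" <;> by_cases hs : x = "S" <;>
      simp_all <;> ring_nf

-- ===== VERDICT (by name: the statement is the Claim_ definition above) =====
theorem cal_n_spec : Claim_equal_cal_n := by
  intro N _
  show cal_n N = cal_n_alt N
  have hstep : List.foldl (fun (nl : List String) item => nl ++ matchA item) []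
      = fun l => l.flatMap matchA := funext stepA_eq_flatMap
  have hl : (PySem.List.pyRange 0 N 1).foldl
      (fun l _ => l.foldl (fun nl item => nl ++ matchA item) []) ["P"] = expandB "P" N.toNat := by
    rw [foldl_ignore, hstep, PySem.List.length_pyRange_one]
    rw [show (N - 0).toNat = N.toNat by simp]
    rw [expand_level N.toNat ["P"] (by intro c hc; simp at hc; subst hc; left; rfl)]
    simp
  simp only [cal_n, cal_n_alt, hl, count_loop]
  simp
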